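-- pv_equiv track=rewrite | github.com/Fernandogf021207/Scr4per | src/utils/images.py | _extension_from_headers
-- ===== SOURCE A (Python) =====
-- from typing import Optional
--
-- def _extension_from_headers(content_type: Optional[str], url: str) -> str:
--     """Choose a reasonable file extension from content-type or URL.
--
--     Falls back to .jpg if unknown.
--     """
--     ct = (content_type or "").lower()
--     if "/" in ct:
--         main, sub = ct.split("/", 1)
--         if main == "image":
--             # Map common subtypes
--             if sub in ("jpeg", "pjpeg", "jpg"):
--                 return ".jpg"
--             if sub in ("png",):
--                 return ".png"
--             if sub in ("webp",):
--                 return ".webp"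
--             if sub in ("gif",):
--                 return ".gif"
--             if sub in ("bmp",):
--                 return ".bmp"
--             if sub in ("x-icon", "ico"):
--                 return ".ico"
--
--     # Try from URL suffix
--     lower_url = url.lower()
--     for ext in (".jpg", ".jpeg", ".png", ".webp", ".gif", ".bmp", ".ico"):
--         if lower_url.endswith(ext):
--             return ".jpg" if ext == ".jpeg" else ext
--
--     return ".jpg"
-- ===== SOURCE B (Python) =====
-- from typing import Optional
--
-- _SUBTYPE_EXT = {
--     "jpeg": ".jpg", "pjpeg": ".jpg", "jpg": ".jpg",
--     "png": ".png", "webp": ".webp", "gif": ".gif",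
--     "bmp": ".bmp", "x-icon": ".ico", "ico": ".ico",
-- }
--
-- _TOKEN_EXT = {
--     "jpg": ".jpg", "jpeg": ".jpg", "png": ".png",
--     "webp": ".webp", "gif": ".gif", "bmp": ".bmp", "ico": ".ico",
-- }
--
-- def _extension_from_headers(content_type: Optional[str], url: str) -> str:
--     ct = (content_type or "").lower()
--     if "/" in ct:
--         main, sub = ct.split("/", 1)
--         if main == "image":
--             ext = _SUBTYPE_EXT.get(sub)
--             if ext is not None:
--                 return ext
--     # take the token after the LAST dot once, then one table lookup
--     parts = url.lower().rsplit(".", 1)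
--     if len(parts) == 2:
--         return _TOKEN_EXT.get(parts[1], ".jpg")
--     return ".jpg"
-- ===== Notes on version B (the rewrite author's own statement) =====
-- stated objective: idiomatic
-- what changed: The subtype-to-extension if-chain becomes one dict lookup, and the URL fallback no longer scans seven endswith candidates: it extracts the token after the last dot once with rsplit('.', 1) and looks it up in a table (jpeg and jpg both map to .jpg).
import Mathlib
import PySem

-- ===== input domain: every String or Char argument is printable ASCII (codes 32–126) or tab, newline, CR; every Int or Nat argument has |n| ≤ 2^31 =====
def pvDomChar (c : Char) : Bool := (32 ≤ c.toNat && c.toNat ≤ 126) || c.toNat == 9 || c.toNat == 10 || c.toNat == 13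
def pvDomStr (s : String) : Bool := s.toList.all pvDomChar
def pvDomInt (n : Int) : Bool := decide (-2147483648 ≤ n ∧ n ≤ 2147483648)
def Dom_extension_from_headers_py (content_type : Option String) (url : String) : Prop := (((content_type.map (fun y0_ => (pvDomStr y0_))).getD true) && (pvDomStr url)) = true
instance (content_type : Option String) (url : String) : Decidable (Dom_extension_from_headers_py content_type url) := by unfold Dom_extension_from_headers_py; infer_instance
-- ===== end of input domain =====

set_option maxHeartbeats 1000000


-- B replaces the subtype if-chain by one dict lookup and the seven-endswith URL scan by
-- rsplit('.', 1) once plus one table lookup (idiomatic; same behaviour everywhere).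

-- ===== PORT A =====
-- the content-type block of A: '"/" in ct' guard, split('/', 1), then the subtype if-chain
def pyCtBranch (ct : String) : Option String :=
  if PySem.Str.isIn "/" ct then
    match PySem.Str.splitMax? ct "/" 1 with
    | some (main :: sub :: _) =>
      if main == "image" then
        if sub == "jpeg" || sub == "pjpeg" || sub == "jpg" then some ".jpg"
        else if sub == "png" then some ".png"
        else if sub == "webp" then some ".webp"
        else if sub == "gif" then some ".gif"
        else if sub == "bmp" then some ".bmp"
        else if sub == "x-icon" || sub == "ico" then some ".ico"
        else none
      else none
    | _ => none
  else none

-- A's for-loop over candidate suffixes, transcribed as structural recursion over the tuple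
def pyExtLoop (lower_url : String) : List String → String
  | [] => ".jpg"
  | e :: rest =>
    if PySem.Str.endswith lower_url e then (if e == ".jpeg" then ".jpg" else e)
    else pyExtLoop lower_url rest

def extension_from_headers_py (content_type : Option String) (url : String) : String :=
  match pyCtBranch (PySem.Str.lower (content_type.getD "")) with
  | some e => e
  | none => pyExtLoop (PySem.Str.lower url) [".jpg", ".jpeg", ".png", ".webp", ".gif", ".bmp", ".ico"]

-- ===== PORT B =====
def subtypeExtDict : PySem.Dict String String :=
  PySem.Dict.ofList [("jpeg", ".jpg"), ("pjpeg", ".jpg"), ("jpg", ".jpg"), ("png", ".png"),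
    ("webp", ".webp"), ("gif", ".gif"), ("bmp", ".bmp"), ("x-icon", ".ico"), ("ico", ".ico")]

def tokenExtDict : PySem.Dict String String :=
  PySem.Dict.ofList [("jpg", ".jpg"), ("jpeg", ".jpg"), ("png", ".png"), ("webp", ".webp"),
    ("gif", ".gif"), ("bmp", ".bmp"), ("ico", ".ico")]

-- B's content-type block: same guard and split, one dict lookup instead of the chain
def altCtBranch (ct : String) : Option String :=
  if PySem.Str.isIn "/" ct then
    match PySem.Str.splitMax? ct "/" 1 with
    | some (main :: sub :: _) => if main == "image" then subtypeExtDict.get? sub else none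
    | _ => none
  else none

-- exact hand port of str.rsplit(sep, 1) for a one-character separator sep:
-- split at the LAST occurrence of sep, or return the whole string if sep is absent
def rsplitOnce (cs : List Char) (sep : Char) : List (List Char) :=
  if sep ∈ cs then
    [((cs.reverse.dropWhile (· != sep)).tail).reverse, (cs.reverse.takeWhile (· != sep)).reverse]
  else [cs]

-- B's URL fallback: token after the last dot, one table lookup, default ".jpg"
def altUrlFallback (url : String) : String :=
  match rsplitOnce (PySem.Chars.lower url.toList) '.' with
  | [_, tok] => tokenExtDict.getD (String.ofList tok) ".jpg"
  | _ => ".jpg"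

def extension_from_headers_py_alt (content_type : Option String) (url : String) : String :=
  match altCtBranch (PySem.Str.lower (content_type.getD "")) with
  | some e => e
  | none => altUrlFallback url

-- ===== PRECONDITION & SPEC =====
def Spec_extension_from_headers_py (content_type : Option String) (url : String) (out : String) : Prop := out = extension_from_headers_py_alt content_type url
instance (content_type : Option String) (url : String) (out : String) : Decidable (Spec_extension_from_headers_py content_type url out) := by unfold Spec_extension_from_headers_py; infer_instance

-- ===== CLAIM (what is proved, stated in full; the proofs are below) =====
def Claim_equal_extension_from_headers_py : Prop := ∀ (content_type : Option String) (url : String), Dom_extension_from_headers_py content_type url → Spec_extension_from_headers_py content_type url (extension_from_headers_py content_type url)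

-- ===== LEMMAS AND PROOFS =====

theorem get?_mk_nil {κ ν : Type} [BEq κ] (x : κ) :
    (PySem.Dict.mk ([] : List (κ × ν))).get? x = none := rfl

-- A's subtype if-chain computes exactly the lookup in subtypeExtDict
theorem subChain_eq_dict (sub : String) :
    (if sub == "jpeg" || sub == "pjpeg" || sub == "jpg" then some ".jpg"
     else if sub == "png" then some ".png"
     else if sub == "webp" then some ".webp"
     else if sub == "gif" then some ".gif"
     else if sub == "bmp" then some ".bmp"
     else if sub == "x-icon" || sub == "ico" then some (".ico" : String)
     else none) = subtypeExtDict.get? sub := by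
  rcases eq_or_ne sub "jpeg" with h | h1
  · subst h; decide
  rcases eq_or_ne sub "pjpeg" with h | h2
  · subst h; decide
  rcases eq_or_ne sub "jpg" with h | h3
  · subst h; decide
  rcases eq_or_ne sub "png" with h | h4
  · subst h; decide
  rcases eq_or_ne sub "webp" with h | h5
  · subst h; decide
  rcases eq_or_ne sub "gif" with h | h6
  · subst h; decide
  rcases eq_or_ne sub "bmp" with h | h7
  · subst h; decide
  rcases eq_or_ne sub "x-icon" with h | h8
  · subst h; decide
  rcases eq_or_ne sub "ico" with h | h9
  · subst h; decide
  have hD : subtypeExtDict = PySem.Dict.mk [("jpeg", ".jpg"), ("pjpeg", ".jpg"), ("jpg", ".jpg"),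
      ("png", ".png"), ("webp", ".webp"), ("gif", ".gif"), ("bmp", ".bmp"),
      ("x-icon", ".ico"), ("ico", ".ico")] := by decide
  rw [hD]
  simp only [PySem.Dict.get?_mk_cons, get?_mk_nil]
  rw [beq_eq_false_iff_ne.mpr h1, beq_eq_false_iff_ne.mpr (Ne.symm h1),
      beq_eq_false_iff_ne.mpr h2, beq_eq_false_iff_ne.mpr (Ne.symm h2),
      beq_eq_false_iff_ne.mpr h3, beq_eq_false_iff_ne.mpr (Ne.symm h3),
      beq_eq_false_iff_ne.mpr h4, beq_eq_false_iff_ne.mpr (Ne.symm h4),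
      beq_eq_false_iff_ne.mpr h5, beq_eq_false_iff_ne.mpr (Ne.symm h5),
      beq_eq_false_iff_ne.mpr h6, beq_eq_false_iff_ne.mpr (Ne.symm h6),
      beq_eq_false_iff_ne.mpr h7, beq_eq_false_iff_ne.mpr (Ne.symm h7),
      beq_eq_false_iff_ne.mpr h8, beq_eq_false_iff_ne.mpr (Ne.symm h8),
      beq_eq_false_iff_ne.mpr h9, beq_eq_false_iff_ne.mpr (Ne.symm h9)]
  simp only [Bool.or_self, Bool.false_eq_true, if_false]

-- the content-type branches of the two ports agree
theorem ctBranch_eq (ct : String) : pyCtBranch ct = altCtBranch ct := by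
  unfold pyCtBranch altCtBranch
  by_cases h : PySem.Str.isIn "/" ct = true
  · simp only [h, if_true]
    cases hsp : PySem.Str.splitMax? ct "/" 1 with
    | none => rfl
    | some parts =>
      cases parts with
      | nil => rfl
      | cons m rest =>
        cases rest with
        | nil => rfl
        | cons s r =>
          by_cases hm : (m == "image") = true
          · simp only [hm, if_true, subChain_eq_dict]
          · simp only [Bool.not_eq_true] at hm
            simp only [hm, Bool.false_eq_true, if_false]
  · simp only [Bool.not_eq_true] at h
    simp only [h, Bool.false_eq_true, if_false]

theorem pref_aux (f : List Char) : ∀ (r : List Char), ('.' : Char) ∉ f →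
    ((f ++ ['.']) <+: r ↔ ('.' ∈ r ∧ r.takeWhile (· != '.') = f)) := by
  induction f with
  | nil =>
    intro r _
    cases r with
    | nil => simp
    | cons c r' =>
      by_cases hc : c = '.'
      · subst hc
        simp [List.cons_prefix_cons]
      · have hc' : (c != '.') = true := by simp [hc]
        have hcm : ¬ ('.' = c) := fun h => hc h.symm
        simp [List.cons_prefix_cons, hc', hcm]
  | cons d f' ih =>
    intro r hf
    rw [List.mem_cons, not_or] at hf
    obtain ⟨hd, hf'⟩ := hf
    cases r with
    | nil => simp
    | cons c r' =>
      by_cases hc : c = '.'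
      · subst hc
        have hd' : ¬ (d = '.') := fun h => hd h.symm
        simp [List.cons_prefix_cons, hd']
      · simp only [List.cons_append, List.cons_prefix_cons, List.takeWhile_cons,
          List.mem_cons, ih r' hf']
        have hc' : (c != '.') = true := by simp [hc]
        have hcm : ¬ ('.' = c) := fun h => hc h.symm
        simp [hc', hcm]
        tauto

theorem suffix_dot (l e : List Char) (he : ('.' : Char) ∉ e) :
    PySem.Chars.endswith l ('.' :: e) = true ↔
      ('.' ∈ l ∧ (l.reverse.takeWhile (· != '.')).reverse = e) := by
  have h1 : PySem.Chars.endswith l ('.' :: e) = true ↔ ('.' :: e) <:+ l := by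
    simp [PySem.Chars.endswith, List.isSuffixOf_iff_suffix]
  have h2 : (('.' :: e) <:+ l) ↔ (e.reverse ++ ['.']) <+: l.reverse := by
    rw [← List.reverse_prefix]
    simp
  rw [h1, h2, pref_aux e.reverse l.reverse (by simpa using he)]
  constructor
  · rintro ⟨hm, ht⟩
    refine ⟨by simpa using hm, ?_⟩
    rw [ht]; simp
  · rintro ⟨hm, ht⟩
    refine ⟨by simpa using hm, ?_⟩
    rw [← ht]; simp

-- the URL fallbacks of the two ports agree
theorem urlFallback_eq (url : String) :
    pyExtLoop (PySem.Str.lower url) [".jpg", ".jpeg", ".png", ".webp", ".gif", ".bmp", ".ico"]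
      = altUrlFallback url := by
  have hld : (PySem.Str.lower url).toList = PySem.Chars.lower url.toList := PySem.Str.toList_lower url
  set l := PySem.Chars.lower url.toList with hl
  have hend : ∀ (p : String), PySem.Str.endswith (PySem.Str.lower url) p = PySem.Chars.endswith l p.toList := by
    intro p
    rw [PySem.Str.endswith_eq, hld]
  by_cases hd : ('.' : Char) ∈ l
  · have hsp : rsplitOnce l '.' =
        [((l.reverse.dropWhile (· != '.')).tail).reverse, (l.reverse.takeWhile (· != '.')).reverse] := by
      simp [rsplitOnce, hd]
    set t := (l.reverse.takeWhile (· != '.')).reverse with hts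
    have key : ∀ (e : List Char), ('.' : Char) ∉ e →
        PySem.Chars.endswith l ('.' :: e) = (t == e) := by
      intro e he
      by_cases ht : t = e
      · have h0 : PySem.Chars.endswith l ('.' :: e) = true := (suffix_dot l e he).mpr ⟨hd, ht⟩
        rw [h0, ht, beq_self_eq_true]
      · have h0 : ¬ PySem.Chars.endswith l ('.' :: e) = true := fun h =>
          ht ((suffix_dot l e he).mp h).2
        simp only [Bool.not_eq_true] at h0
        rw [h0, beq_eq_false_iff_ne.mpr ht]
    have hof : ∀ (s : String) (cs : List Char), (s == String.ofList cs) = (cs == s.toList) := by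
      intro s cs
      by_cases hec : s.toList = cs
      · have hs : s = String.ofList cs := by rw [← hec, String.ofList_toList]
        subst hs
        rw [String.toList_ofList]
        simp
      · have hne : s ≠ String.ofList cs := by
          intro h
          apply hec
          rw [h, String.toList_ofList]
        rw [beq_eq_false_iff_ne.mpr hne,
            beq_eq_false_iff_ne.mpr (fun h => hec h.symm)]
    have hgd : tokenExtDict = PySem.Dict.mk [("jpg", ".jpg"), ("jpeg", ".jpg"), ("png", ".png"),
        ("webp", ".webp"), ("gif", ".gif"), ("bmp", ".bmp"), ("ico", ".ico")] := by decide
    have hr : altUrlFallback url = tokenExtDict.getD (String.ofList t) ".jpg" := by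
      unfold altUrlFallback
      rw [← hl, hsp]
    rw [hr]
    simp only [pyExtLoop, hend]
    rw [show (".jpg" : String).toList = '.' :: ['j','p','g'] from rfl,
        show (".jpeg" : String).toList = '.' :: ['j','p','e','g'] from rfl,
        show (".png" : String).toList = '.' :: ['p','n','g'] from rfl,
        show (".webp" : String).toList = '.' :: ['w','e','b','p'] from rfl,
        show (".gif" : String).toList = '.' :: ['g','i','f'] from rfl,
        show (".bmp" : String).toList = '.' :: ['b','m','p'] from rfl,
        show (".ico" : String).toList = '.' :: ['i','c','o'] from rfl]
    rw [key ['j','p','g'] (by decide), key ['j','p','e','g'] (by decide),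
        key ['p','n','g'] (by decide), key ['w','e','b','p'] (by decide),
        key ['g','i','f'] (by decide), key ['b','m','p'] (by decide),
        key ['i','c','o'] (by decide)]
    rw [show ((".jpg" : String) == ".jpeg") = false from by decide,
        show ((".jpeg" : String) == ".jpeg") = true from by decide,
        show ((".png" : String) == ".jpeg") = false from by decide,
        show ((".webp" : String) == ".jpeg") = false from by decide,
        show ((".gif" : String) == ".jpeg") = false from by decide,
        show ((".bmp" : String) == ".jpeg") = false from by decide,
        show ((".ico" : String) == ".jpeg") = false from by decide]
    simp only [Bool.false_eq_true, if_false, if_true]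
    simp only [PySem.Dict.getD_eq_get?_getD, hgd, PySem.Dict.get?_mk_cons, get?_mk_nil]
    rw [hof "jpg" t, hof "jpeg" t, hof "png" t, hof "webp" t, hof "gif" t, hof "bmp" t, hof "ico" t]
    rw [show ("jpg" : String).toList = ['j','p','g'] from rfl,
        show ("jpeg" : String).toList = ['j','p','e','g'] from rfl,
        show ("png" : String).toList = ['p','n','g'] from rfl,
        show ("webp" : String).toList = ['w','e','b','p'] from rfl,
        show ("gif" : String).toList = ['g','i','f'] from rfl,
        show ("bmp" : String).toList = ['b','m','p'] from rfl,
        show ("ico" : String).toList = ['i','c','o'] from rfl]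
    rcases eq_or_ne t ['j','p','g'] with h | h1
    · rw [h]; decide
    rcases eq_or_ne t ['j','p','e','g'] with h | h2
    · rw [h]; decide
    rcases eq_or_ne t ['p','n','g'] with h | h3
    · rw [h]; decide
    rcases eq_or_ne t ['w','e','b','p'] with h | h4
    · rw [h]; decide
    rcases eq_or_ne t ['g','i','f'] with h | h5
    · rw [h]; decide
    rcases eq_or_ne t ['b','m','p'] with h | h6
    · rw [h]; decide
    rcases eq_or_ne t ['i','c','o'] with h | h7
    · rw [h]; decide
    rw [beq_eq_false_iff_ne.mpr h1, beq_eq_false_iff_ne.mpr h2, beq_eq_false_iff_ne.mpr h3,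
        beq_eq_false_iff_ne.mpr h4, beq_eq_false_iff_ne.mpr h5, beq_eq_false_iff_ne.mpr h6,
        beq_eq_false_iff_ne.mpr h7]
    simp only [Bool.false_eq_true, if_false, Option.getD_none]
  · have hsp : rsplitOnce l '.' = [l] := by simp [rsplitOnce, hd]
    have hfalse : ∀ (e : List Char), ('.' : Char) ∉ e →
        PySem.Chars.endswith l ('.' :: e) = false := by
      intro e he
      cases h : PySem.Chars.endswith l ('.' :: e) with
      | false => rfl
      | true => exact absurd ((suffix_dot l e he).mp h).1 hd
    have hr : altUrlFallback url = ".jpg" := by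
      unfold altUrlFallback
      rw [← hl, hsp]
    rw [hr]
    simp only [pyExtLoop, hend]
    rw [show (".jpg" : String).toList = '.' :: ['j','p','g'] from rfl,
        show (".jpeg" : String).toList = '.' :: ['j','p','e','g'] from rfl,
        show (".png" : String).toList = '.' :: ['p','n','g'] from rfl,
        show (".webp" : String).toList = '.' :: ['w','e','b','p'] from rfl,
        show (".gif" : String).toList = '.' :: ['g','i','f'] from rfl,
        show (".bmp" : String).toList = '.' :: ['b','m','p'] from rfl,
        show (".ico" : String).toList = '.' :: ['i','c','o'] from rfl]
    rw [hfalse ['j','p','g'] (by decide), hfalse ['j','p','e','g'] (by decide),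
        hfalse ['p','n','g'] (by decide), hfalse ['w','e','b','p'] (by decide),
        hfalse ['g','i','f'] (by decide), hfalse ['b','m','p'] (by decide),
        hfalse ['i','c','o'] (by decide)]
    simp only [Bool.false_eq_true, if_false]

-- ===== VERDICT (by name: the statement is the Claim_ definition above) =====
theorem extension_from_headers_py_spec : Claim_equal_extension_from_headers_py := by
  intro content_type url _
  unfold Spec_extension_from_headers_py extension_from_headers_py extension_from_headers_py_alt
  rw [ctBranch_eq]
  cases altCtBranch (PySem.Str.lower (content_type.getD "")) with
  | some e => rfl
  | none => exact urlFallback_eq url
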